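-- pv_equiv track=rewrite | github.com/alfuadi/sajiva | Sajiva_2024.py | filter_data_by_date
-- ===== SOURCE A (Python) =====
-- def filter_data_by_date(file_content, target_date):
--     lines = file_content.split('\n')
--
--     filtered_data = []
--     is_target_date = False
--
--     for line in lines:
--         if target_date in line:
--             is_target_date = True
--         elif 'Observations at' in line:
--             is_target_date = False
--
--         if is_target_date:
--             filtered_data.append(line)
--
--     return filtered_data
-- ===== SOURCE B (Python) =====
-- def filter_data_by_date(file_content, target_date):
--     lines = file_content.split('\n')
--     # segment into blocks: a new block starts at every line containing 'Observations at'
--     blocks = []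
--     current = []
--     for line in lines:
--         if 'Observations at' in line:
--             blocks.append(current)
--             current = [line]
--         else:
--             current.append(line)
--     blocks.append(current)
--     # each block contributes its suffix starting at the first line containing target_date
--     result = []
--     for block in blocks:
--         for i, line in enumerate(block):
--             if target_date in line:
--                 result.extend(block[i:])
--                 break
--     return result
-- ===== Notes on version B (the rewrite author's own statement) =====
-- stated objective: alternative
-- what changed: Replaced A's single pass with a running boolean flag by explicit segmentation of the lines into 'Observations at'-delimited blocks followed by a per-block first-match suffix extraction.
import Mathlib
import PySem

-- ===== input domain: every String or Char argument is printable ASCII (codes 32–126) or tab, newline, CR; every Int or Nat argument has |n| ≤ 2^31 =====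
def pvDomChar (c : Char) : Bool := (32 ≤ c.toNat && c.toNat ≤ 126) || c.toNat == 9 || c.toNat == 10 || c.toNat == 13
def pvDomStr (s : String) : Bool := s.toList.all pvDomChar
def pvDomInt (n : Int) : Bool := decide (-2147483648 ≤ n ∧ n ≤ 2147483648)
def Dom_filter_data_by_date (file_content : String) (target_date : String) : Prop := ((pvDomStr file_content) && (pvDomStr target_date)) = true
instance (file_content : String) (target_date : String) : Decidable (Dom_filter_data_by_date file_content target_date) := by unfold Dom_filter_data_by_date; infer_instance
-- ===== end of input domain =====

-- B replaces A's running boolean flag with explicit segmentation into 'Observations at' blocks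
-- plus a first-match suffix per block (objective: alternative decomposition, same cost).

-- ===== PORT A =====
-- loop body of A's for-loop: state = (filtered_data, is_target_date)
def pvAStep (target_date : String) (st : List String × Bool) (line : String) : List String × Bool :=
  let is_target_date :=
    if PySem.Str.isIn target_date line then true
    else if PySem.Str.isIn "Observations at" line then false
    else st.2
  (if is_target_date then st.1 ++ [line] else st.1, is_target_date)

-- file_content.split('\n'): the separator is the nonempty "\n", so split? is always `some`
def filter_data_by_date (file_content : String) (target_date : String) : List String :=
  let lines := (PySem.Str.split? file_content "\n").getD []
  (lines.foldl (pvAStep target_date) ([], false)).1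

-- ===== PORT B =====
-- segmentation loop body of Source B: state = (blocks, current)
def pvSegStep (st : List (List String) × List String) (line : String) : List (List String) × List String :=
  if PySem.Str.isIn "Observations at" line then (st.1 ++ [st.2], [line])
  else (st.1, st.2 ++ [line])

-- Source B's inner loop: 'for i, line in enumerate(block): if target_date in line: result.extend(block[i:]); break'
def pvBlockSuffix (target_date : String) : List String → List String
  | [] => []
  | line :: rest =>
    if PySem.Str.isIn target_date line then line :: rest
    else pvBlockSuffix target_date rest

def filter_data_by_date_alt (file_content : String) (target_date : String) : List String :=
  let lines := (PySem.Str.split? file_content "\n").getD []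
  let seg := lines.foldl pvSegStep ([], [])
  let blocks := seg.1 ++ [seg.2]
  blocks.foldl (fun res blk => res ++ pvBlockSuffix target_date blk) []

-- ===== PRECONDITION & SPEC =====
def Spec_filter_data_by_date (file_content : String) (target_date : String) (out : List String) : Prop := out = filter_data_by_date_alt file_content target_date
instance (file_content : String) (target_date : String) (out : List String) : Decidable (Spec_filter_data_by_date file_content target_date out) := by unfold Spec_filter_data_by_date; infer_instance

-- ===== CLAIM (what is proved, stated in full; the proofs are below) =====
def Claim_equal_filter_data_by_date : Prop := ∀ (file_content : String) (target_date : String), Dom_filter_data_by_date file_content target_date → Spec_filter_data_by_date file_content target_date (filter_data_by_date file_content target_date)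

-- ===== LEMMAS AND PROOFS =====

-- recursive reading of A's loop: the lines appended from state `flag` on
def pvALoop (td : String) : List String → Bool → List String
  | [], _ => []
  | l :: ls, flag =>
    let b := if PySem.Str.isIn td l then true
             else if PySem.Str.isIn "Observations at" l then false
             else flag
    (if b then [l] else []) ++ pvALoop td ls b

theorem pvFoldA (td : String) (ls : List String) (acc : List String) (flag : Bool) :
    (ls.foldl (pvAStep td) (acc, flag)).1 = acc ++ pvALoop td ls flag := by
  induction ls generalizing acc flag with
  | nil => simp [pvALoop]
  | cons l ls ih =>
    have hstep : pvAStep td (acc, flag) l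
        = (if (if PySem.Str.isIn td l then true
               else if PySem.Str.isIn "Observations at" l then false else flag)
           then acc ++ [l] else acc,
           if PySem.Str.isIn td l then true
           else if PySem.Str.isIn "Observations at" l then false else flag) := rfl
    have hloop : pvALoop td (l :: ls) flag
        = (if (if PySem.Str.isIn td l then true
               else if PySem.Str.isIn "Observations at" l then false else flag)
           then [l] else [])
          ++ pvALoop td ls
              (if PySem.Str.isIn td l then true
               else if PySem.Str.isIn "Observations at" l then false else flag) := rfl
    rw [List.foldl_cons, hstep, ih, hloop]
    cases hb : (if PySem.Str.isIn td l then true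
                else if PySem.Str.isIn "Observations at" l then false else flag) with
    | false => simp only [Bool.false_eq_true, if_false, List.nil_append]
    | true => simp only [if_true, List.append_assoc, List.singleton_append]

theorem pvFoldB (td : String) (bs : List (List String)) (res : List String) :
    bs.foldl (fun r blk => r ++ pvBlockSuffix td blk) res
      = res ++ bs.flatMap (pvBlockSuffix td) := by
  induction bs generalizing res with
  | nil => simp
  | cons b bs ih => simp [ih]

theorem pvSegStep_pos (bs : List (List String)) (cur : List String) (l : String)
    (hq : PySem.Str.isIn "Observations at" l = true) :
    pvSegStep (bs, cur) l = (bs ++ [cur], [l]) := by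
  simp only [pvSegStep, hq, if_true]

theorem pvSegStep_neg (bs : List (List String)) (cur : List String) (l : String)
    (hq : PySem.Str.isIn "Observations at" l = false) :
    pvSegStep (bs, cur) l = (bs, cur ++ [l]) := by
  simp only [pvSegStep, hq, Bool.false_eq_true, if_false]

theorem pvSegPrefix (ls : List String) (bs : List (List String)) (cur : List String) :
    (ls.foldl pvSegStep (bs, cur)).1 ++ [(ls.foldl pvSegStep (bs, cur)).2]
      = bs ++ ((ls.foldl pvSegStep ([], cur)).1 ++ [(ls.foldl pvSegStep ([], cur)).2]) := by
  induction ls generalizing bs cur with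
  | nil => simp
  | cons l ls ih =>
    cases hq : PySem.Str.isIn "Observations at" l with
    | true =>
      rw [List.foldl_cons, List.foldl_cons, pvSegStep_pos _ _ _ hq, pvSegStep_pos _ _ _ hq]
      rw [ih (bs ++ [cur]) [l], ih ([] ++ [cur]) [l]]
      simp
    | false =>
      rw [List.foldl_cons, List.foldl_cons, pvSegStep_neg _ _ _ hq, pvSegStep_neg _ _ _ hq]
      exact ih bs (cur ++ [l])

theorem pvSuffix_cons_pos (td l : String) (ls : List String)
    (h : PySem.Str.isIn td l = true) :
    pvBlockSuffix td (l :: ls) = l :: ls := by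
  simp only [pvBlockSuffix, h, if_true]

theorem pvSuffix_cons_neg (td l : String) (ls : List String)
    (h : PySem.Str.isIn td l = false) :
    pvBlockSuffix td (l :: ls) = pvBlockSuffix td ls := by
  simp only [pvBlockSuffix, h, Bool.false_eq_true, if_false]

theorem pvSuffix_append_of_any (td : String) (cur : List String) (l : String)
    (h : cur.any (fun x => PySem.Str.isIn td x) = true) :
    pvBlockSuffix td (cur ++ [l]) = pvBlockSuffix td cur ++ [l] := by
  induction cur with
  | nil => simp at h
  | cons c cs ih =>
    rw [List.any_cons] at h
    cases hc : PySem.Str.isIn td c with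
    | true =>
      rw [List.cons_append, pvSuffix_cons_pos td c _ hc, pvSuffix_cons_pos td c _ hc,
        List.cons_append]
    | false =>
      rw [hc, Bool.false_or] at h
      rw [List.cons_append, pvSuffix_cons_neg td c _ hc, pvSuffix_cons_neg td c _ hc]
      exact ih h

theorem pvSuffix_none (td : String) (cur : List String)
    (h : cur.any (fun x => PySem.Str.isIn td x) = false) :
    pvBlockSuffix td cur = [] := by
  induction cur with
  | nil => rfl
  | cons c cs ih =>
    rw [List.any_cons, Bool.or_eq_false_iff] at h
    rw [pvSuffix_cons_neg td c _ h.1]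
    exact ih h.2

theorem pvSuffix_append_of_none (td : String) (cur : List String) (l : String)
    (h : cur.any (fun x => PySem.Str.isIn td x) = false) :
    pvBlockSuffix td (cur ++ [l])
      = if PySem.Str.isIn td l then [l] else [] := by
  induction cur with
  | nil =>
    cases hl : PySem.Str.isIn td l with
    | true =>
      rw [List.nil_append, pvSuffix_cons_pos td l _ hl]
      simp
    | false =>
      rw [List.nil_append, pvSuffix_cons_neg td l _ hl]
      simp [pvBlockSuffix]
  | cons c cs ih =>
    rw [List.any_cons, Bool.or_eq_false_iff] at h
    rw [List.cons_append, pvSuffix_cons_neg td c _ h.1]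
    exact ih h.2

theorem pvMain (td : String) (ls : List String) (cur : List String) (flag : Bool)
    (hf : flag = cur.any (fun x => PySem.Str.isIn td x)) :
    pvBlockSuffix td cur ++ pvALoop td ls flag
      = ((ls.foldl pvSegStep ([], cur)).1 ++ [(ls.foldl pvSegStep ([], cur)).2]).flatMap
          (pvBlockSuffix td) := by
  induction ls generalizing cur flag with
  | nil => simp [pvALoop]
  | cons l ls ih =>
    have hloop : pvALoop td (l :: ls) flag
        = (if (if PySem.Str.isIn td l then true
               else if PySem.Str.isIn "Observations at" l then false else flag)
           then [l] else [])
          ++ pvALoop td ls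
              (if PySem.Str.isIn td l then true
               else if PySem.Str.isIn "Observations at" l then false else flag) := rfl
    rw [List.foldl_cons, hloop]
    cases hq : PySem.Str.isIn "Observations at" l with
    | true =>
      rw [pvSegStep_pos _ _ _ hq, List.nil_append,
        pvSegPrefix ls [cur] [l], List.flatMap_append, List.flatMap_cons, List.flatMap_nil,
        List.append_nil]
      cases hp : PySem.Str.isIn td l with
      | true =>
        rw [← ih [l] true (by rw [List.any_cons, List.any_nil, hp, Bool.true_or]),
          pvSuffix_cons_pos td l [] hp]
        simp
      | false =>
        rw [← ih [l] false (by rw [List.any_cons, List.any_nil, hp, Bool.false_or]),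
          pvSuffix_cons_neg td l [] hp]
        simp [pvBlockSuffix]
    | false =>
      rw [pvSegStep_neg _ _ _ hq]
      cases hfv : flag with
      | true =>
        have hany : cur.any (fun x => PySem.Str.isIn td x) = true := by
          rw [← hf, hfv]
        rw [← ih (cur ++ [l]) true
            (by rw [List.any_append, hany, Bool.true_or]),
          pvSuffix_append_of_any td cur l hany]
        cases hp : PySem.Str.isIn td l with
        | true => simp
        | false => simp
      | false =>
        have hany : cur.any (fun x => PySem.Str.isIn td x) = false := by
          rw [← hf, hfv]
        cases hp : PySem.Str.isIn td l with
        | true =>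
          have hp' : PySem.Chars.isIn td.toList l.toList = true := by simpa using hp
          have hany' : (cur ++ [l]).any (fun x => PySem.Str.isIn td x) = true := by
            rw [List.any_append, hany, Bool.false_or, List.any_cons, List.any_nil, hp,
              Bool.or_false]
          rw [← ih (cur ++ [l]) true (by rw [hany']),
            pvSuffix_append_of_none td cur l hany, pvSuffix_none td cur hany]
          simp [hp']
        | false =>
          have hp' : PySem.Chars.isIn td.toList l.toList = false := by simpa using hp
          have hany' : (cur ++ [l]).any (fun x => PySem.Str.isIn td x) = false := by
            rw [List.any_append, hany, Bool.false_or, List.any_cons, List.any_nil, hp,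
              Bool.or_false]
          rw [← ih (cur ++ [l]) false (by rw [hany']),
            pvSuffix_append_of_none td cur l hany, pvSuffix_none td cur hany]
          simp [hp']

-- ===== VERDICT (by name: the statement is the Claim_ definition above) =====
theorem filter_data_by_date_spec : Claim_equal_filter_data_by_date := by
  intro fc td _
  unfold Spec_filter_data_by_date filter_data_by_date filter_data_by_date_alt
  rw [pvFoldA, pvFoldB, List.nil_append, List.nil_append]
  have h := pvMain td ((PySem.Str.split? fc "\n").getD []) [] false (by simp)
  rw [pvBlockSuffix] at h
  rw [← h, List.nil_append]
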